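-- pv_equiv track=rewrite | github.com/Stardreama/wxapkg | restorer/wxml_restorer.py | _is_valid_wxml_tag
-- ===== SOURCE A (Python) =====
-- def _is_valid_wxml_tag(tag: str) -> bool:
--     """检查是否是有效的 WXML 标签"""
--     valid_tags = [
--         'view', 'text', 'image', 'button', 'input', 'scroll-view',
--         'swiper', 'swiper-item', 'icon', 'navigator', 'form',
--         'checkbox', 'radio', 'picker', 'slider', 'switch',
--         'textarea', 'video', 'audio', 'map', 'canvas',
--         'block', 'template', 'import', 'include', 'wxs'
--     ]
--     for t in valid_tags:
--         if f'<{t}' in tag.lower():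
--             return True
--     return False
-- ===== SOURCE B (Python) =====
-- _WXML_TAGS = frozenset((
--     'view', 'text', 'image', 'button', 'input', 'scroll-view',
--     'swiper', 'swiper-item', 'icon', 'navigator', 'form',
--     'checkbox', 'radio', 'picker', 'slider', 'switch',
--     'textarea', 'video', 'audio', 'map', 'canvas',
--     'block', 'template', 'import', 'include', 'wxs'
-- ))
-- _TAG_LENS = sorted({len(t) for t in _WXML_TAGS})
--
--
-- def _is_valid_wxml_tag(tag: str) -> bool:
--     """Dictionary matching: at each '<' in the lowered string, look the
--     candidate name (the next k characters, for each known tag length k)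
--     up in a hash set, instead of running one substring search per tag."""
--     s = tag.lower()
--     return any(s[i] == '<' and s[i + 1:i + 1 + k] in _WXML_TAGS
--                for i in range(len(s)) for k in _TAG_LENS)
-- ===== Notes on version B (the rewrite author's own statement) =====
-- stated objective: alternative
-- what changed: Replaced A's 26 independent substring searches (one per tag name, over the lowered string) by set-based dictionary matching: one pass over the positions of the lowered string that, at each opening angle bracket, looks the following k characters up in a hash set of tag names for each of the 8 distinct tag lengths.
import Mathlib
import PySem

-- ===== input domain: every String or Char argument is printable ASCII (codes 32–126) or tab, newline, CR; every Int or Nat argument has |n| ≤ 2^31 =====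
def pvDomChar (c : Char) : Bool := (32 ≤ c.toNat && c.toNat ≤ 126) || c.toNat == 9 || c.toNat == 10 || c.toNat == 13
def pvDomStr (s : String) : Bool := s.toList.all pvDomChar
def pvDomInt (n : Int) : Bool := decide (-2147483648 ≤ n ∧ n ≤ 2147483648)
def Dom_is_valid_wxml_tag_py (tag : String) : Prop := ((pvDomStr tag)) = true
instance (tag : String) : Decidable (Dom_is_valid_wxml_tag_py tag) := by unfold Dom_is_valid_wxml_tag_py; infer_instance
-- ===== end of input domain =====

-- B replaces A's 26 per-tag substring searches by set-based dictionary matching: at each '<'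
-- of the lowered string it looks the next k characters up in a set of tag names, for each
-- distinct tag length k (objective: alternative; different algorithm, similar cost).

-- ===== PORT A =====
def wxmlValidTags : List String :=
  ["view", "text", "image", "button", "input", "scroll-view",
   "swiper", "swiper-item", "icon", "navigator", "form",
   "checkbox", "radio", "picker", "slider", "switch",
   "textarea", "video", "audio", "map", "canvas",
   "block", "template", "import", "include", "wxs"]

-- for t in valid_tags: if f'<{t}' in tag.lower(): return True / return False
def is_valid_wxml_tag_py (tag : String) : Bool :=
  wxmlValidTags.any (fun t => PySem.Chars.isIn ('<' :: t.toList) (PySem.Chars.lower tag.toList))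

-- ===== PORT B =====
-- _WXML_TAGS = frozenset((...))
def altTagSet : PySem.Set (List Char) :=
  PySem.Set.ofList
    (["view", "text", "image", "button", "input", "scroll-view",
      "swiper", "swiper-item", "icon", "navigator", "form",
      "checkbox", "radio", "picker", "slider", "switch",
      "textarea", "video", "audio", "map", "canvas",
      "block", "template", "import", "include", "wxs"].map String.toList)

-- _TAG_LENS = sorted({len(t) for t in _WXML_TAGS})  (order-safe: sorted of a set, no key)
def altTagLens : List Nat :=
  PySem.List.sorted (PySem.Set.ofList (altTagSet.map List.length)) (fun k => k) false

-- any(s[i] == '<' and s[i+1:i+1+k] in _WXML_TAGS for i in range(len(s)) for k in _TAG_LENS)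
def is_valid_wxml_tag_py_alt (tag : String) : Bool :=
  let s := PySem.Chars.lower tag.toList
  (List.range s.length).any fun i =>
    altTagLens.any fun k =>
      (s[i]? == some '<') &&
        PySem.Set.contains altTagSet
          (PySem.List.slice s (some ((i + 1 : Nat) : Int)) (some ((i + 1 + k : Nat) : Int)))

-- ===== PRECONDITION & SPEC =====
def Spec_is_valid_wxml_tag_py (tag : String) (out : Bool) : Prop := out = is_valid_wxml_tag_py_alt tag
instance (tag : String) (out : Bool) : Decidable (Spec_is_valid_wxml_tag_py tag out) := by unfold Spec_is_valid_wxml_tag_py; infer_instance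

-- ===== CLAIM (what is proved, stated in full; the proofs are below) =====
def Claim_equal_is_valid_wxml_tag_py : Prop := ∀ (tag : String), Dom_is_valid_wxml_tag_py tag → Spec_is_valid_wxml_tag_py tag (is_valid_wxml_tag_py tag)

-- ===== LEMMAS AND PROOFS =====

-- c::l occurs as an infix of s iff at some position i the character is c and l follows
theorem cons_infix_iff_exists_pos {α : Type} (c : α) (l s : List α) :
    ((c :: l) <:+: s) ↔ ∃ i < s.length, s[i]? = some c ∧ l <+: s.drop (i + 1) := by
  constructor
  · rintro ⟨p, q, rfl⟩
    exact ⟨p.length, by simp, by simp, by simp⟩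
  · rintro ⟨i, hi, hc, ⟨r, hr⟩⟩
    refine ⟨s.take i, r, ?_⟩
    have h2 : s = s.take i ++ s.drop i := (List.take_append_drop i s).symm
    rw [List.getElem?_eq_getElem hi] at hc
    have hdrop : s.drop i = c :: s.drop (i + 1) := by
      rw [List.drop_eq_getElem_cons hi, Option.some_inj.mp hc]
    rw [hdrop, ← hr] at h2
    simpa using h2.symm

-- a k-length prefix of d is in the tag set for some admitted length k iff some tag is a prefix of d
theorem take_mem_iff_prefix (d : List Char) :
    (∃ k ∈ altTagLens, d.take k ∈ altTagSet) ↔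
      ∃ t ∈ wxmlValidTags, t.toList <+: d := by
  constructor
  · rintro ⟨k, _, hmem⟩
    have : d.take k ∈ (wxmlValidTags.map String.toList) := by
      simpa [altTagSet, PySem.Set.mem_ofList, wxmlValidTags] using hmem
    obtain ⟨t, ht, hteq⟩ := List.mem_map.mp this
    exact ⟨t, ht, hteq ▸ List.take_prefix k d⟩
  · rintro ⟨t, ht, hpre⟩
    refine ⟨t.toList.length, ?_, ?_⟩
    · -- each tag's length is one of the admitted lengths (concrete lists: decide)
      fin_cases ht <;> decide
    · rw [← List.prefix_iff_eq_take.mp hpre]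
      simp only [altTagSet, PySem.Set.mem_ofList, List.mem_map]
      exact ⟨t, ht, rfl⟩

-- the slice s[i+1:i+1+k] is (s.drop (i+1)).take k
theorem slice_eq_drop_take (s : List Char) (i k : Nat) :
    PySem.List.slice s (some ((i + 1 : Nat) : Int)) (some ((i + 1 + k : Nat) : Int)) =
      (s.drop (i + 1)).take k := by
  rw [PySem.List.slice_natCast]
  congr 1
  omega

-- ===== VERDICT (by name: the statement is the Claim_ definition above) =====
theorem is_valid_wxml_tag_py_spec : Claim_equal_is_valid_wxml_tag_py := by
  intro tag _
  unfold Spec_is_valid_wxml_tag_py is_valid_wxml_tag_py is_valid_wxml_tag_py_alt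
  rw [Bool.eq_iff_iff]
  simp only [List.any_eq_true, PySem.Chars.isIn_iff_infix, List.mem_range,
    Bool.and_eq_true, beq_iff_eq, PySem.Set.contains_iff, slice_eq_drop_take,
    cons_infix_iff_exists_pos]
  constructor
  · rintro ⟨t, ht, i, hi, hc, hpre⟩
    refine ⟨i, hi, ?_⟩
    obtain ⟨k, hk, hmem⟩ :=
      (take_mem_iff_prefix (PySem.Chars.lower tag.toList |>.drop (i + 1))).mpr ⟨t, ht, hpre⟩
    exact ⟨k, hk, hc, hmem⟩
  · rintro ⟨i, hi, k, hk, hc, hmem⟩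
    obtain ⟨t, ht, hpre⟩ :=
      (take_mem_iff_prefix (PySem.Chars.lower tag.toList |>.drop (i + 1))).mp ⟨k, hk, hmem⟩
    exact ⟨t, ht, i, hi, hc, hpre⟩
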